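-- pv_equiv track=rewrite | github.com/eom175/Openclaw_Stockresearch | src/policylink/dart/disclosures.py | merge_flags
-- ===== SOURCE A (Python) =====
-- from typing import Any, Dict, Iterable, List, Optional, Tuple
--
-- FEATURE_FLAG_KEYS = [
--     "contract_supply",
--     "new_investment",
--     "treasury_stock",
--     "dividend",
--     "bonus_issue",
--     "paid_in_capital_increase",
--     "convertible_bond",
--     "ownership_change",
--     "trading_halt",
--     "delisting_risk",
--     "lawsuit",
--     "embezzlement_breach",
--     "audit_opinion_risk",
--     "correction_delay",
-- ]
--
-- def merge_flags(events: Iterable[Dict[str, Any]]) -> Dict[str, int]: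
--     merged = {key: 0 for key in FEATURE_FLAG_KEYS}
--     for event in events:
--         flags = event.get("feature_flags", {})
--         if not isinstance(flags, dict):
--             continue
--         for key in FEATURE_FLAG_KEYS:
--             if flags.get(key):
--                 merged[key] = 1
--     return merged
-- ===== SOURCE B (Python) =====
-- from typing import Any, Dict, Iterable
--
-- FEATURE_FLAG_KEYS = [
--     "contract_supply",
--     "new_investment",
--     "treasury_stock",
--     "dividend",
--     "bonus_issue",
--     "paid_in_capital_increase",
--     "convertible_bond",
--     "ownership_change",
--     "trading_halt",
--     "delisting_risk",
--     "lawsuit",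
--     "embezzlement_breach",
--     "audit_opinion_risk",
--     "correction_delay",
-- ]
--
-- def merge_flags(events: Iterable[Dict[str, Any]]) -> Dict[str, int]:
--     # Pass 1: collect the set of keys that are truthy in ANY event's flag dict,
--     # walking each dict's OWN items (not the 14-key constant list per event).
--     on = set()
--     for event in events:
--         flags = event.get("feature_flags")
--         if isinstance(flags, dict):
--             for k, v in flags.items():
--                 if v:
--                     on.add(k)
--     # Pass 2: project the active-key set onto the canonical key list.
--     return {key: (1 if key in on else 0) for key in FEATURE_FLAG_KEYS}
-- ===== Notes on version B (the rewrite author's own statement) =====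
-- stated objective: alternative
-- what changed: Replaces A's per-event scan of the 14-key constant list with dict mutation (init all keys to 0, overwrite to 1) by a two-pass design: first collect a set of keys found truthy while iterating each flag dict's own items, then project that set onto FEATURE_FLAG_KEYS; the inner loop over the constant key list disappears.
import Mathlib
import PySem

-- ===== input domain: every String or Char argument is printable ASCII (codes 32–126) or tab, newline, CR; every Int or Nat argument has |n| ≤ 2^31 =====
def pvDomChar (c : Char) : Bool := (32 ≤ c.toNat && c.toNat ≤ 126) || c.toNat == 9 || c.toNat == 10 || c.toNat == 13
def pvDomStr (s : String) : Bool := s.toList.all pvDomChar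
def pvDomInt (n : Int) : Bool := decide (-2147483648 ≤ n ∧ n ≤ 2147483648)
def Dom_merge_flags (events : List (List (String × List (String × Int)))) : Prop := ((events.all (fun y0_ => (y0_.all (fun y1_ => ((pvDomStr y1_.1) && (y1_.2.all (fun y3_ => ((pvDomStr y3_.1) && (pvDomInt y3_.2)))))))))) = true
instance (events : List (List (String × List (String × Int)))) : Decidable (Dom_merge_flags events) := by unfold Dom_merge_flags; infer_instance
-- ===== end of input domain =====

-- B replaces A's per-event scan of the constant key list with dict mutation by a two-pass
-- design: collect the set of truthy flag keys from each dict's own items, then project it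
-- onto FEATURE_FLAG_KEYS (objective: alternative decomposition, same cost).


-- FEATURE_FLAG_KEYS (module constant, shared by both programs)
def pvKeys : List String :=
  ["contract_supply", "new_investment", "treasury_stock", "dividend", "bonus_issue",
   "paid_in_capital_increase", "convertible_bond", "ownership_change", "trading_halt",
   "delisting_risk", "lawsuit", "embezzlement_breach", "audit_opinion_risk", "correction_delay"]

-- Python truthiness of flags.get(key): a present, nonzero int
def pvTruthy (flags : List (String × Int)) (key : String) : Bool :=
  match (PySem.Dict.mk flags).get? key with
  | some v => v != 0
  | none => false

-- ===== PORT A =====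
def merge_flags (events : List (List (String × List (String × Int)))) : List (String × Int) :=
  -- merged = {key: 0 for key in FEATURE_FLAG_KEYS}
  let merged0 : PySem.Dict String Int :=
    pvKeys.foldl (fun d k => d.insert k 0) PySem.Dict.empty
  -- for event in events: flags = event.get("feature_flags", {}); for key in KEYS: if flags.get(key): merged[key] = 1
  -- (the isinstance(flags, dict) guard cannot fail in the typed representation)
  let merged := events.foldl (fun m event =>
    let flags := (PySem.Dict.mk event).getD "feature_flags" []
    pvKeys.foldl (fun m k => if pvTruthy flags k then m.insert k 1 else m) m) merged0
  merged.items

-- ===== PORT B =====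
def merge_flags_alt (events : List (List (String × List (String × Int)))) : List (String × Int) :=
  -- pass 1: on = set(); for event in events: for k, v in flags.items(): if v: on.add(k)
  -- (event.get("feature_flags") returning a non-dict cannot occur in the typed representation)
  let on : PySem.Set String := events.foldl (fun on event =>
      let flags := (PySem.Dict.mk event).getD "feature_flags" []
      (PySem.Dict.mk flags).items.foldl
        (fun on kv => if kv.2 != 0 then PySem.Set.add on kv.1 else on) on)
    PySem.Set.empty
  -- pass 2: {key: 1 if key in on else 0 for key in FEATURE_FLAG_KEYS}
  pvKeys.map (fun key => (key, if on.contains key then (1 : Int) else 0))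

-- ===== PRECONDITION & SPEC =====
-- Pre_ excludes events whose "feature_flags" association list carries duplicate keys: a Python
-- dict cannot hold them, so the assoc-list encoding is ambiguous there (A's first-match lookup
-- vs. B's iteration over all pairs) and neither behaviour is specified.
def Pre_merge_flags (events : List (List (String × List (String × Int)))) : Prop :=
  ∀ e ∈ events, (((PySem.Dict.mk e).getD "feature_flags" []).map Prod.fst).Nodup
instance (events : List (List (String × List (String × Int)))) : Decidable (Pre_merge_flags events) := by unfold Pre_merge_flags; infer_instance

def pvWitness_merge_flags : (List (List (String × List (String × Int)))) :=
  [[("feature_flags", [("dividend", 1), ("lawsuit", 0)])], [("other", [])]]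

def Spec_merge_flags (events : List (List (String × List (String × Int)))) (out : List (String × Int)) : Prop := out = merge_flags_alt events
instance (events : List (List (String × List (String × Int)))) (out : List (String × Int)) : Decidable (Spec_merge_flags events out) := by unfold Spec_merge_flags; infer_instance

-- ===== CLAIM (what is proved, stated in full; the proofs are below) =====
def Claim_equal_merge_flags : Prop := ∀ (events : List (List (String × List (String × Int)))), Dom_merge_flags events → Pre_merge_flags events → Spec_merge_flags events (merge_flags events)

-- ===== LEMMAS AND PROOFS =====

-- "event has key truthy" predicate both sides are reduced to
def pvFlagSet (event : List (String × List (String × Int))) (key : String) : Bool :=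
  pvTruthy ((PySem.Dict.mk event).getD "feature_flags" []) key

-- ---- A side: the dict-mutation loops on a "map over pvKeys" state ----

-- inserting 1 at a key that occurs in pvKeys keeps the state in "map over pvKeys" shape
lemma pv_insert_shape (f : String → Int) (k0 : String) (hk0 : k0 ∈ pvKeys) :
    (PySem.Dict.mk (pvKeys.map (fun k => (k, f k)))).insert k0 1
      = PySem.Dict.mk (pvKeys.map (fun k => (k, if k == k0 then 1 else f k))) := by
  apply PySem.Dict.ext
  rw [PySem.Dict.items_insert_of_contains]
  · show _ = List.map (fun k => (k, if (k == k0) = true then (1:Int) else f k)) pvKeys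
    rw [List.map_map]
    apply List.map_congr_left
    intro k _
    by_cases h : k = k0 <;> simp [h]
  · simp [PySem.Dict.contains_mk]
    exact hk0

-- the inner loop over L ⊆ pvKeys, on a "map over pvKeys" state
lemma pv_inner (t : String → Bool) :
    ∀ (L : List String) (f : String → Int), (∀ k ∈ L, k ∈ pvKeys) →
    L.foldl (fun m k => if t k then m.insert k 1 else m)
        (PySem.Dict.mk (pvKeys.map (fun k => (k, f k))))
      = PySem.Dict.mk (pvKeys.map (fun k => (k, if L.contains k && t k then 1 else f k))) := by
  intro L
  induction L with
  | nil => intro f _; simp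
  | cons k0 tl ih =>
    intro f hsub
    simp only [List.foldl_cons]
    by_cases h0 : t k0
    · rw [if_pos h0, pv_insert_shape f k0 (hsub k0 (by simp)),
        ih _ (fun k hk => hsub k (List.mem_cons_of_mem _ hk))]
      congr 1
      apply List.map_congr_left
      intro k _
      by_cases hk0 : k = k0
      · simp [hk0, h0]
      · simp [hk0]
    · rw [if_neg h0, ih _ (fun k hk => hsub k (List.mem_cons_of_mem _ hk))]
      congr 1
      apply List.map_congr_left
      intro k _
      by_cases hk0 : k = k0
      · subst hk0; simp [h0]
      · simp [hk0]

-- the outer loop over events, on a "map over pvKeys" state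
lemma pv_outer :
    ∀ (es : List (List (String × List (String × Int)))) (f : String → Int),
    es.foldl (fun m event =>
        let flags := (PySem.Dict.mk event).getD "feature_flags" []
        pvKeys.foldl (fun m k => if pvTruthy flags k then m.insert k 1 else m) m)
        (PySem.Dict.mk (pvKeys.map (fun k => (k, f k))))
      = PySem.Dict.mk (pvKeys.map (fun k =>
          (k, if es.any (fun e => pvFlagSet e k) then 1 else f k))) := by
  intro es
  induction es with
  | nil => intro f; simp
  | cons e tl ih =>
    intro f
    simp only [List.foldl_cons]
    rw [pv_inner _ pvKeys f (fun k hk => hk), ih]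
    congr 1
    apply List.map_congr_left
    intro k hk
    have hc : pvKeys.contains k = true := List.elem_eq_true_of_mem hk
    simp only [hc, Bool.true_and, List.any_cons, pvFlagSet]
    by_cases h : pvTruthy ((PySem.Dict.mk e).getD "feature_flags" []) k <;> simp [h]

-- the initial dict {key: 0 for key in FEATURE_FLAG_KEYS} in "map" shape
lemma pv_init :
    pvKeys.foldl (fun d k => d.insert k (0 : Int)) PySem.Dict.empty
      = PySem.Dict.mk (pvKeys.map (fun k => (k, (0 : Int)))) := by
  decide

-- ---- B side: membership in the accumulated set of truthy keys ----

lemma pv_contains_add (s : PySem.Set String) (x k : String) :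
    (PySem.Set.add s x).contains k = (s.contains k || k == x) := by
  simp only [PySem.Set.add]
  split <;> simp_all [PySem.Set.contains, Bool.beq_eq_decide_eq]

-- the inner fold over one flag list accumulates exactly its truthy keys
lemma pv_set_fold_contains :
    ∀ (l : List (String × Int)) (s : PySem.Set String) (k : String),
    (l.foldl (fun on kv => if kv.2 != 0 then PySem.Set.add on kv.1 else on) s).contains k
      = (s.contains k || l.any (fun kv => kv.1 == k && kv.2 != 0)) := by
  intro l
  induction l with
  | nil => simp
  | cons kv tl ih =>
    intro s k
    simp only [List.foldl_cons, List.any_cons]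
    by_cases hv : kv.2 = 0
    · rw [if_neg (by simp [hv]), ih]
      simp [hv]
    · rw [if_pos (by simp [hv]), ih, pv_contains_add]
      by_cases hk : kv.1 = k
      · subst hk
        simp [hv]
      · simp [Bool.beq_eq_decide_eq, hk, Ne.symm hk]

-- with unique keys, "some pair (k, v≠0) occurs" is exactly first-match truthiness
lemma pv_any_eq_truthy (k : String) :
    ∀ (flags : List (String × Int)), (flags.map Prod.fst).Nodup →
    flags.any (fun kv => kv.1 == k && kv.2 != 0) = pvTruthy flags k := by
  intro flags
  induction flags with
  | nil => intro _; simp [pvTruthy, PySem.Dict.get?]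
  | cons kv tl ih =>
    intro hnd
    simp only [List.map_cons, List.nodup_cons] at hnd
    simp only [List.any_cons, pvTruthy]
    rw [PySem.Dict.get?_mk_cons]
    by_cases hk : kv.1 = k
    · subst hk
      have htl : tl.any (fun kv' => kv'.1 == kv.1 && kv'.2 != 0) = false := by
        simp only [List.any_eq_false]
        intro p hp
        have : p.1 ≠ kv.1 := fun h => hnd.1 (h ▸ List.mem_map_of_mem hp)
        simp [this]
      simp [htl]
    · have := ih hnd.2
      simp only [pvTruthy] at this
      simp [hk, this]

-- the outer fold over events: membership = "truthy in some event" (given unique keys)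
lemma pv_outer_set :
    ∀ (es : List (List (String × List (String × Int)))),
    (∀ e ∈ es, (((PySem.Dict.mk e).getD "feature_flags" []).map Prod.fst).Nodup) →
    ∀ (s : PySem.Set String) (k : String),
    (es.foldl (fun on event =>
        let flags := (PySem.Dict.mk event).getD "feature_flags" []
        (PySem.Dict.mk flags).items.foldl
          (fun on kv => if kv.2 != 0 then PySem.Set.add on kv.1 else on) on) s).contains k
      = (s.contains k || es.any (fun e => pvFlagSet e k)) := by
  intro es
  induction es with
  | nil => simp
  | cons e tl ih =>
    intro hnd s k
    simp only [List.foldl_cons, List.any_cons]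
    rw [ih (fun e' he' => hnd e' (List.mem_cons_of_mem _ he')),
      pv_set_fold_contains, pv_any_eq_truthy k _ (hnd e (by simp))]
    simp [pvFlagSet, Bool.or_assoc]

-- ===== VERDICT (by name: the statement is the Claim_ definition above) =====
theorem merge_flags_spec : Claim_equal_merge_flags := by
  intro events _ hpre
  show merge_flags events = merge_flags_alt events
  unfold merge_flags merge_flags_alt
  rw [pv_init]
  refine (congrArg PySem.Dict.items (pv_outer events (fun _ => 0))).trans ?_
  show (pvKeys.map fun k => (k, if events.any (fun e => pvFlagSet e k) then (1 : Int) else 0))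
      = pvKeys.map fun key => (key,
          if (events.foldl (fun on event =>
                let flags := (PySem.Dict.mk event).getD "feature_flags" []
                (PySem.Dict.mk flags).items.foldl
                  (fun on kv => if kv.2 != 0 then PySem.Set.add on kv.1 else on) on)
              PySem.Set.empty).contains key then (1 : Int) else 0)
  apply List.map_congr_left
  intro k _
  rw [pv_outer_set events hpre PySem.Set.empty k]
  simp [PySem.Set.empty, PySem.Set.contains]
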